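-- pv_equiv track=rewrite | github.com/daniel-reich/ubiquitous-fiesta | tfbKAYwHq2ot2FK3i_2.py | non_repeats
-- ===== SOURCE A (Python) =====
-- def non_repeats(radix):
--     count = 0
--     for num_digits in range(1, radix + 1):
--         product = radix - 1
--         for i in range(1, num_digits):
--             product *= (radix - i)
--         count += product
--     return count
-- ===== SOURCE B (Python) =====
-- def non_repeats(radix):
--     # One pass: maintain the falling-factorial product incrementally.
--     count = 0
--     product = radix - 1
--     for k in range(1, radix + 1):
--         count += product
--         product *= (radix - k)
--     return count
-- ===== Notes on version B (the rewrite author's own statement) =====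
-- stated objective: faster
-- what changed: Replaced the nested loop that rebuilds the falling-factorial product from scratch for each length by a single pass that updates the product incrementally.
import Mathlib
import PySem

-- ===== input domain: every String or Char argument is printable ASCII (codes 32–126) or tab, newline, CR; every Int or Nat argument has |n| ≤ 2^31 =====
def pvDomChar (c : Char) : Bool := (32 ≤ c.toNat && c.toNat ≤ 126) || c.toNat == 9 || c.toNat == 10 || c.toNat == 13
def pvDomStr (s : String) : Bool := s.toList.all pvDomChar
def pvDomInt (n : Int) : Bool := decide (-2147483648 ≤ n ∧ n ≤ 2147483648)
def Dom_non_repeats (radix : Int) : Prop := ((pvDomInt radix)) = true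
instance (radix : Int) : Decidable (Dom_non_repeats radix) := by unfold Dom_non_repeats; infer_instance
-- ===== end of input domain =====

-- B replaces A's nested O(radix^2) recomputation by one pass updating the product incrementally (faster, asymptotic).

-- ===== PORT A =====
def non_repeats (radix : Int) : Int :=
  (PySem.List.pyRange 1 (radix + 1) 1).foldl
    (fun count num_digits =>
      count + (PySem.List.pyRange 1 num_digits 1).foldl
        (fun product i => product * (radix - i)) (radix - 1))
    0

-- ===== PORT B =====
def non_repeats_alt (radix : Int) : Int :=
  ((PySem.List.pyRange 1 (radix + 1) 1).foldl
    (fun (s : Int × Int) k => (s.1 + s.2, s.2 * (radix - k)))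
    (0, radix - 1)).1

-- ===== PRECONDITION & SPEC =====
def Spec_non_repeats (radix : Int) (out : Int) : Prop := out = non_repeats_alt radix
instance (radix : Int) (out : Int) : Decidable (Spec_non_repeats radix out) := by unfold Spec_non_repeats; infer_instance

-- ===== CLAIM (what is proved, stated in full; the proofs are below) =====
def Claim_equal_non_repeats : Prop := ∀ (radix : Int), Dom_non_repeats radix → Spec_non_repeats radix (non_repeats radix)

-- ===== LEMMAS AND PROOFS =====

-- A's inner product for a given number of digits
def pvProd (radix n : Int) : Int :=
  (PySem.List.pyRange 1 n 1).foldl (fun product i => product * (radix - i)) (radix - 1)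

lemma pvProd_succ (radix : Int) (n : Nat) :
    pvProd radix ((n : Int) + 1 + 1) = pvProd radix ((n : Int) + 1) * (radix - ((n : Int) + 1)) := by
  unfold pvProd
  rw [PySem.List.pyRange_one_succ_right (by omega : (1:Int) ≤ (n:Int) + 1)]
  simp

-- invariant for B's fold over 1..n, relating it to A's fold and pvProd
lemma pv_inv (radix : Int) (n : Nat) :
    (PySem.List.pyRange 1 ((n : Int) + 1) 1).foldl
      (fun (s : Int × Int) k => (s.1 + s.2, s.2 * (radix - k))) (0, radix - 1)
    = ((PySem.List.pyRange 1 ((n : Int) + 1) 1).foldl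
        (fun count num_digits => count + pvProd radix num_digits) 0,
       pvProd radix ((n : Int) + 1)) := by
  induction n with
  | zero =>
      simp [PySem.List.pyRange_one_eq_nil (by omega : (1:Int) ≤ 1), pvProd]
  | succ m ih =>
      have h : (1:Int) ≤ (m : Int) + 1 := by omega
      have hrw : ((m:Int) + 1 + 1) = (((m+1 : Nat) : Int) + 1) := by push_cast; ring
      rw [← hrw, PySem.List.pyRange_one_succ_right h, List.foldl_append, List.foldl_append, ih]
      simp [pvProd_succ]

lemma pv_main (radix : Int) : non_repeats radix = non_repeats_alt radix := by
  unfold non_repeats non_repeats_alt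
  by_cases h : radix ≤ 0
  · rw [PySem.List.pyRange_one_eq_nil (by omega : radix + 1 ≤ 1)]
    simp
  · have hn : radix + 1 = ((radix.toNat : Int) + 1) := by omega
    rw [hn, pv_inv radix radix.toNat]
    rfl

-- ===== VERDICT (by name: the statement is the Claim_ definition above) =====
theorem non_repeats_spec : Claim_equal_non_repeats := by
  intro radix _
  unfold Spec_non_repeats
  exact pv_main radix
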